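-- pv_equiv track=rewrite | github.com/gumaonelove/ege_2021 | Сборник 100 задач Джобс Средний/25_3.py | f
-- ===== SOURCE A (Python) =====
-- def prime(n):
--     if n <= 1: return False
--     elif n == 2: return True
--     elif n%2==0: return False
--     for i in range(3, int(n**0.5)+1, 2):
--         if n%i==0: return False
--     return True
--
-- def go_prime_list():
--     A = []
--     for n in range(1, 1500):
--         if prime(n): A.append(n)
--     return A
--
-- def sumka(N):
--     s = 0
--     for n in N: s+= n
--     return s
--
-- def proz(N):
--     p = 1
--     for n in N: p*=n
--     return p
--
-- def f(n):
--     devs = []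
--     for i in go_prime_list():
--         if n%i==0: devs.append(i)
--     if len(devs)<3: return 0
--     if len(devs)==3 and sumka(devs)<1000 and proz(devs)==n:
--         return(sumka(devs))
--     return 0
-- ===== SOURCE B (Python) =====
-- def f(n):
--     # trial-divide n directly instead of scanning a fixed prime table
--     if n < 2:
--         return 0
--     m, s, k, d = n, 0, 0, 2
--     while d * d <= m:
--         if m % d == 0:
--             m //= d
--             if m % d == 0:   # repeated prime factor -> n not squarefree
--                 return 0
--             s += d
--             k += 1
--         d += 1
--     if m > 1:
--         s += m
--         k += 1
--     return s if k == 3 and s < 1000 else 0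
-- ===== Notes on version B (the rewrite author's own statement) =====
-- stated objective: faster
-- what changed: B trial-divides n itself (stopping at the square root of the shrinking cofactor) to collect its distinct prime factors and detect repeated ones, instead of first sieving a fixed table of all primes below A's bound with per-number primality tests and then filtering that table by divisibility; A's sum bound makes its table bound redundant, so the results agree on every int.
import Mathlib
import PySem

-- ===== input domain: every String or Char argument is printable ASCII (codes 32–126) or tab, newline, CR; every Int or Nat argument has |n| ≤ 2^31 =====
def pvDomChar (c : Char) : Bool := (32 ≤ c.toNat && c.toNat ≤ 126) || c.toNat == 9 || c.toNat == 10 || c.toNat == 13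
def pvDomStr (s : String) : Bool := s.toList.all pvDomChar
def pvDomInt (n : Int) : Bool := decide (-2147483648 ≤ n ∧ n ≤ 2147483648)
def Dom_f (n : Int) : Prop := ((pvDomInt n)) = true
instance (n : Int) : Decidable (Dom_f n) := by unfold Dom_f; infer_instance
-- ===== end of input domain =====

-- B trial-divides n itself instead of filtering a sieved table of the 239 primes below 1500; return values agree on every int.

-- ===== PORT A =====
-- int(n**0.5) is ported as Int.sqrt: exact for every argument this helper receives (small nonnegative ints,
-- where the float square root is exact enough that int() truncation equals the integer square root).
def primeA (n : Int) : Bool :=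
  if n ≤ 1 then false
  else if n == 2 then true
  else if PySem.Int.mod n 2 == 0 then false
  else !((PySem.List.pyRange 3 (Int.sqrt n + 1) 2).any (fun i => PySem.Int.mod n i == 0))

def go_prime_list : List Int :=
  (PySem.List.pyRange 1 1500 1).foldl (fun A n => if primeA n then A ++ [n] else A) []

def sumka (N : List Int) : Int := N.foldl (fun s n => s + n) 0

def proz (N : List Int) : Int := N.foldl (fun p n => p * n) 1

def f (n : Int) : Int :=
  let devs := go_prime_list.foldl (fun devs i => if PySem.Int.mod n i == 0 then devs ++ [i] else devs) []
  if devs.length < 3 then 0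
  else if devs.length = 3 ∧ sumka devs < 1000 ∧ proz devs = n then sumka devs
  else 0

-- ===== PORT B =====
-- the while-loop of Source B, on the nonnegative ints it actually runs on (n ≥ 2), so Nat `/`/`%` = Python `//`/`%`
def trialLoop (m s k d : Nat) : Int :=
  if _h : d * d ≤ m then
    if _hdvd : m % d = 0 then
      if _h2 : (m / d) % d = 0 then 0
      else trialLoop (m / d) (s + d) (k + 1) (d + 1)
    else trialLoop m s k (d + 1)
  else
    if m > 1 then (if k + 1 = 3 ∧ s + m < 1000 then ((s + m : Nat) : Int) else 0)
    else (if k = 3 ∧ s < 1000 then (s : Int) else 0)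
termination_by m + 1 - d
decreasing_by
  · have hd2 : 2 ≤ d := by
      rcases Nat.lt_or_ge d 2 with hlt | hge
      · interval_cases d <;> simp_all [Nat.mod_zero, Nat.mod_one, Nat.div_one]
      · exact hge
    have h4 : 2 * 2 ≤ m := le_trans (Nat.mul_le_mul hd2 hd2) _h
    have h1 : m / d < m := Nat.div_lt_self (by omega) (by omega)
    have h2 : d ≤ m := le_trans (Nat.le_mul_of_pos_left d (by omega)) _h
    omega
  · rcases Nat.eq_zero_or_pos d with rfl | hpos
    · omega
    · have : d ≤ m := le_trans (Nat.le_mul_of_pos_left d hpos) _h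
      omega

def f_alt (n : Int) : Int :=
  if n < 2 then 0
  else trialLoop n.toNat 0 0 2

-- ===== PRECONDITION & SPEC =====
def Spec_f (n : Int) (out : Int) : Prop := out = f_alt n
instance (n : Int) (out : Int) : Decidable (Spec_f n out) := by unfold Spec_f; infer_instance

-- ===== CLAIM (what is proved, stated in full; the proofs are below) =====
def Claim_equal_f : Prop := ∀ (n : Int), Dom_f n → Spec_f n (f n)

-- ===== LEMMAS AND PROOFS =====

-- reference value both sides are reduced to: sum of the distinct prime factors of n,
-- when n is squarefree with exactly three of them and that sum is < 1000
def sig (N : Nat) : Nat := ∑ p ∈ N.primeFactors, p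

def gref (n : Int) : Int :=
  if 2 ≤ n ∧ Squarefree n.toNat ∧ n.toNat.primeFactors.card = 3 ∧ sig n.toNat < 1000
  then (sig n.toNat : Int) else 0

theorem prime_of_trial (m d : Nat) (hm : 1 < m) (h : ¬ d * d ≤ m)
    (hfac : ∀ p, Nat.Prime p → p ∣ m → d ≤ p) : Nat.Prime m := by
  by_contra hnp
  have h1 := Nat.minFac_sq_le_self (by omega) hnp
  have hp := Nat.minFac_prime (by omega : m ≠ 1)
  have hdle := hfac _ hp (Nat.minFac_dvd m)
  have h2 : d * d ≤ m.minFac * m.minFac := Nat.mul_le_mul hdle hdle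
  have h3 : m.minFac * m.minFac ≤ m := by nlinarith [h1]
  exact h (le_trans h2 h3)

theorem loop_correct (m s k d : Nat) (hm : 1 ≤ m) (hd : 2 ≤ d)
    (hfac : ∀ p, Nat.Prime p → p ∣ m → d ≤ p) :
    trialLoop m s k d =
      if Squarefree m ∧ k + m.primeFactors.card = 3 ∧ s + sig m < 1000
      then ((s + sig m : Nat) : Int) else 0 := by
  revert hm hd hfac
  induction m, s, k, d using trialLoop.induct with
  | case1 m s k d hA hB hC =>
    intro hm hd hfac
    rw [trialLoop, dif_pos hA, dif_pos hB, dif_pos hC]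
    have hdm : d ∣ m := Nat.dvd_of_mod_eq_zero hB
    have hdd : d * d ∣ m := (Nat.dvd_div_iff_mul_dvd hdm).mp (Nat.dvd_of_mod_eq_zero hC)
    have hnsq : ¬ Squarefree m := by
      intro hsq
      have := Nat.isUnit_iff.mp (hsq d hdd)
      omega
    rw [if_neg (by tauto)]
  | case2 m s k d hA hB hC ih =>
    intro hm hd hfac
    have hdm : d ∣ m := Nat.dvd_of_mod_eq_zero hB
    have hm' : m = d * (m / d) := (Nat.mul_div_cancel' hdm).symm
    have hdm2 : d ≤ m := le_trans (Nat.le_mul_of_pos_left d (by omega)) hA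
    have hm'1 : 1 ≤ m / d := (Nat.le_div_iff_mul_le (by omega)).mpr (by omega)
    have hnd : ¬ d ∣ m / d := fun hcon => hC (Nat.mod_eq_zero_of_dvd hcon)
    have hdprime : Nat.Prime d := by
      rw [Nat.prime_def_minFac]
      refine ⟨hd, le_antisymm (Nat.minFac_le (by omega)) ?_⟩
      exact hfac _ (Nat.minFac_prime (by omega)) ((Nat.minFac_dvd d).trans hdm)
    have hcop : Nat.Coprime d (m / d) := (hdprime.coprime_iff_not_dvd).mpr hnd
    have hfac' : ∀ p, Nat.Prime p → p ∣ m / d → d + 1 ≤ p := by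
      intro p hp hpd
      have h1 : p ∣ m := hpd.trans (Nat.div_dvd_of_dvd hdm)
      have h2 : d ≤ p := hfac p hp h1
      have h3 : p ≠ d := by rintro rfl; exact hnd hpd
      omega
    have hdnot : d ∉ (m / d).primeFactors := by
      intro hcon
      exact hnd (Nat.dvd_of_mem_primeFactors hcon)
    have hPF : m.primeFactors = insert d (m / d).primeFactors := by
      conv_lhs => rw [hm']
      rw [Nat.primeFactors_mul (by omega) (by omega), hdprime.primeFactors,
        Finset.singleton_union]
    have hcard : m.primeFactors.card = (m / d).primeFactors.card + 1 := by
      rw [hPF, Finset.card_insert_of_notMem hdnot]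
    have hsig : sig m = d + sig (m / d) := by
      unfold sig
      rw [hPF, Finset.sum_insert hdnot]
    have hsqf : Squarefree m ↔ Squarefree (m / d) := by
      conv_lhs => rw [hm']
      rw [Nat.squarefree_mul hcop]
      simp [hdprime.squarefree]
    rw [trialLoop, dif_pos hA, dif_pos hB, dif_neg hC, ih hm'1 (by omega) hfac']
    have hcond : (Squarefree m ∧ k + m.primeFactors.card = 3 ∧ s + sig m < 1000) ↔
        (Squarefree (m / d) ∧ k + 1 + (m / d).primeFactors.card = 3 ∧ s + d + sig (m / d) < 1000) := by
      rw [hsqf, hcard, hsig]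
      constructor <;> rintro ⟨a, b, c⟩ <;> exact ⟨a, by omega, by omega⟩
    by_cases hc : Squarefree (m / d) ∧ k + 1 + (m / d).primeFactors.card = 3 ∧ s + d + sig (m / d) < 1000
    · rw [if_pos hc, if_pos (hcond.mpr hc), hsig]
      push_cast
      ring
    · rw [if_neg hc, if_neg (fun hx => hc (hcond.mp hx))]
  | case3 m s k d hA hB ih =>
    intro hm hd hfac
    have hfac' : ∀ p, Nat.Prime p → p ∣ m → d + 1 ≤ p := by
      intro p hp hpd
      have h2 : d ≤ p := hfac p hp hpd
      have h3 : p ≠ d := by rintro rfl; exact hB (Nat.mod_eq_zero_of_dvd hpd)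
      omega
    rw [trialLoop, dif_pos hA, dif_neg hB]
    exact ih hm (by omega) hfac'
  | case4 m s k d hA hB hC =>
    intro hm hd hfac
    have hp : Nat.Prime m := prime_of_trial m d hB hA hfac
    rw [trialLoop, dif_neg hA, if_pos hB, if_pos hC]
    rw [if_pos ⟨hp.squarefree, by simp [hp.primeFactors]; omega,
      by simp [hp.primeFactors, sig]; omega⟩]
    simp [hp.primeFactors, sig]
  | case5 m s k d hA hB hC =>
    intro hm hd hfac
    have hp : Nat.Prime m := prime_of_trial m d hB hA hfac
    rw [trialLoop, dif_neg hA, if_pos hB, if_neg hC]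
    rw [if_neg]
    simp only [hp.primeFactors, sig, Finset.sum_singleton, Finset.card_singleton]
    rintro ⟨-, h1, h2⟩
    exact hC ⟨by omega, by omega⟩
  | case6 m s k d hA hB hC =>
    intro hm hd hfac
    have hm1 : m = 1 := by omega
    subst hm1
    rw [trialLoop, dif_neg hA, if_neg hB, if_pos hC]
    rw [if_pos ⟨squarefree_one, by simp; omega, by simp [sig]; omega⟩]
    simp [sig]
  | case7 m s k d hA hB hC =>
    intro hm hd hfac
    have hm1 : m = 1 := by omega
    subst hm1
    rw [trialLoop, dif_neg hA, if_neg hB, if_neg hC]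
    rw [if_neg]
    simp only [sig, Nat.primeFactors_one, Finset.sum_empty, Finset.card_empty]
    rintro ⟨-, h1, h2⟩
    exact hC ⟨by omega, by omega⟩

theorem f_alt_eq (n : Int) : f_alt n = gref n := by
  unfold f_alt gref
  by_cases h : n < 2
  · rw [if_pos h, if_neg (by rintro ⟨h2, -⟩; omega)]
  · rw [if_neg h, loop_correct n.toNat 0 0 2 (by omega) le_rfl (fun p hp _ => hp.two_le)]
    have h2 : (2 : Int) ≤ n := by omega
    simp [h2]

theorem primeA_iff (x : Int) (hx : 1 ≤ x) : primeA x = true ↔ Nat.Prime x.toNat := by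
  unfold primeA
  by_cases h1 : x ≤ 1
  · have hx1 : x = 1 := le_antisymm h1 hx
    subst hx1
    simp [Nat.not_prime_one]
  rw [if_neg h1]
  by_cases h2 : x = 2
  · subst h2
    simp [Nat.prime_two]
  rw [if_neg (by simp [h2])]
  have hx3 : 3 ≤ x := by
    rcases lt_or_ge x 3 with h | h
    · interval_cases x; simp_all
    · exact h
  by_cases h3 : (2 : Int) ∣ x
  · rw [if_pos (by simpa [PySem.Int.mod_eq_zero_iff_dvd] using h3)]
    have : ¬ Nat.Prime x.toNat := by
      intro hp
      have h2d : 2 ∣ x.toNat := by omega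
      rcases (Nat.Prime.eq_one_or_self_of_dvd hp 2 h2d) with h | h <;> omega
    simp [this]
  rw [if_neg (by simpa [PySem.Int.mod_eq_zero_iff_dvd] using h3)]
  have hsqrt : Int.sqrt x = (Nat.sqrt x.toNat : Int) := rfl
  rw [Bool.not_eq_eq_eq_not, Bool.not_true, List.any_eq_false]
  constructor
  · intro hall
    by_contra hnp
    set N := x.toNat with hNdef
    have hN3 : 3 ≤ N := by omega
    set j := N.minFac with hjdef
    have hp : Nat.Prime j := Nat.minFac_prime (by omega)
    have hdvd : j ∣ N := Nat.minFac_dvd N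
    have hsq : j ^ 2 ≤ N := Nat.minFac_sq_le_self (by omega) hnp
    have hj2 : j ≠ 2 := by
      rintro hj2e
      apply h3
      have hdd : (2 : Nat) ∣ N := hj2e ▸ hdvd
      have hddi : (2 : Int) ∣ (N : Int) := Int.natCast_dvd_natCast.mpr hdd
      have hx0 : x = (N : Int) := by omega
      rw [hx0]
      exact hddi
    have hj3 : 3 ≤ j := by
      have := hp.two_le
      omega
    have hjodd : j % 2 = 1 := by
      by_contra hodd
      have h2d : 2 ∣ j := by omega
      rcases hp.eq_one_or_self_of_dvd 2 h2d with h | h <;> omega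
    have hjle : j ≤ Nat.sqrt N := Nat.le_sqrt'.mpr hsq
    have hmem : (j : Int) ∈ PySem.List.pyRange 3 (Int.sqrt x + 1) 2 := by
      rw [PySem.List.mem_pyRange_iff_of_pos (by omega)]
      refine ⟨by exact_mod_cast hj3, ?_, by omega⟩
      rw [hsqrt]
      have : (j : Int) ≤ (Nat.sqrt N : Int) := by exact_mod_cast hjle
      omega
    have hres := hall _ hmem
    simp only [beq_iff_eq, PySem.Int.mod_eq_zero_iff_dvd] at hres
    apply hres
    have hx0 : x = (N : Int) := by omega
    rw [hx0]
    exact Int.natCast_dvd_natCast.mpr hdvd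
  · intro hprime i hi
    rw [PySem.List.mem_pyRange_iff_of_pos (by omega)] at hi
    obtain ⟨hi3, hilt, -⟩ := hi
    simp only [beq_iff_eq, PySem.Int.mod_eq_zero_iff_dvd]
    intro hdvd
    set N := x.toNat with hNdef
    have hx0 : x = (N : Int) := by omega
    set j := i.toNat with hjdef
    have hij : i = (j : Int) := by omega
    have hjd : j ∣ N := by
      rw [hx0, hij] at hdvd
      exact_mod_cast hdvd
    rcases hprime.eq_one_or_self_of_dvd j hjd with h | h
    · omega
    · -- j = N, but j ≤ sqrt N < N
      rw [hsqrt] at hilt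
      have hjle : j ≤ Nat.sqrt N := by omega
      have := Nat.sqrt_lt_self (show 1 < N by omega)
      omega

theorem gl_eq : go_prime_list = (PySem.List.pyRange 1 1500 1).filter primeA := by
  unfold go_prime_list
  rw [PySem.List.foldl_append_if_eq_filter, List.nil_append]

theorem mem_gl (x : Int) : x ∈ go_prime_list ↔ 1 ≤ x ∧ x < 1500 ∧ Nat.Prime x.toNat := by
  rw [gl_eq, List.mem_filter, PySem.List.mem_pyRange_one]
  constructor
  · rintro ⟨⟨ha, hb⟩, hp⟩
    exact ⟨ha, hb, (primeA_iff x ha).mp hp⟩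
  · rintro ⟨ha, hb, hp⟩
    exact ⟨⟨ha, hb⟩, (primeA_iff x ha).mpr hp⟩

theorem gl_nodup : go_prime_list.Nodup := by
  rw [gl_eq]
  exact (PySem.List.nodup_pyRange_one 1 1500).filter _

-- the list A names `devs`, lifted out of f for the proofs
def devsL (n : Int) : List Int := go_prime_list.filter (fun i => PySem.Int.mod n i == 0)

theorem f_eq_devs (n : Int) : f n =
    if (devsL n).length < 3 then 0
    else if (devsL n).length = 3 ∧ sumka (devsL n) < 1000 ∧ proz (devsL n) = n then sumka (devsL n)
    else 0 := by
  simp only [f, devsL, PySem.List.foldl_append_if_eq_filter, List.nil_append]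

theorem mem_devs (n x : Int) : x ∈ devsL n ↔ (1 ≤ x ∧ x < 1500 ∧ Nat.Prime x.toNat) ∧ x ∣ n := by
  unfold devsL
  rw [List.mem_filter, mem_gl]
  simp [PySem.Int.mod_eq_zero_iff_dvd, and_assoc]

theorem devs_nodup (n : Int) : (devsL n).Nodup := gl_nodup.filter _

theorem sumka_eq (l : List Int) : sumka l = l.sum := by
  rw [List.sum_eq_foldl]
  rfl

theorem proz_eq (l : List Int) : proz l = l.prod := by
  rw [List.prod_eq_foldl]
  rfl

theorem devs_toFinset (n : Int) (hn : 2 ≤ n) :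
    (devsL n).toFinset = (n.toNat.primeFactors.filter (· < 1500)).image (Nat.cast : Nat → Int) := by
  ext x
  simp only [List.mem_toFinset, mem_devs, Finset.mem_image, Finset.mem_filter,
    Nat.mem_primeFactors]
  constructor
  · rintro ⟨⟨h1, h2, hp⟩, hd⟩
    refine ⟨x.toNat, ⟨⟨hp, ?_, by omega⟩, by omega⟩, by omega⟩
    have hx0 : x = ((x.toNat : Nat) : Int) := by omega
    have hn0 : n = ((n.toNat : Nat) : Int) := by omega
    rw [hx0, hn0] at hd
    exact_mod_cast hd
  · rintro ⟨p, ⟨⟨hp, hd, -⟩, hlt⟩, rfl⟩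
    have h2 := hp.two_le
    refine ⟨⟨by exact_mod_cast h2.trans' (by omega), by exact_mod_cast hlt, by simp [hp]⟩, ?_⟩
    have hn0 : n = ((n.toNat : Nat) : Int) := by omega
    rw [hn0]
    exact_mod_cast Int.natCast_dvd_natCast.mpr hd

theorem devs_length (n : Int) (hn : 2 ≤ n) :
    (devsL n).length = (n.toNat.primeFactors.filter (· < 1500)).card := by
  rw [← List.toFinset_card_of_nodup (devs_nodup n), devs_toFinset n hn,
    Finset.card_image_of_injective _ Nat.cast_injective]

theorem devs_sum (n : Int) (hn : 2 ≤ n) :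
    sumka (devsL n) = ((∑ p ∈ n.toNat.primeFactors.filter (· < 1500), p : Nat) : Int) := by
  have h1 : (devsL n).toFinset.sum id = (devsL n).sum := by
    rw [List.sum_toFinset _ (devs_nodup n)]
    simp
  rw [sumka_eq, ← h1, devs_toFinset n hn,
    Finset.sum_image (Nat.cast_injective.injOn)]
  push_cast
  simp

theorem devs_prod (n : Int) (hn : 2 ≤ n) :
    proz (devsL n) = ((∏ p ∈ n.toNat.primeFactors.filter (· < 1500), p : Nat) : Int) := by
  have h1 : (devsL n).toFinset.prod id = (devsL n).prod := by
    rw [List.prod_toFinset _ (devs_nodup n)]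
    simp
  rw [proz_eq, ← h1, devs_toFinset n hn,
    Finset.prod_image (Nat.cast_injective.injOn)]
  push_cast
  simp

theorem f_eq (n : Int) : f n = gref n := by
  rw [f_eq_devs]
  unfold gref
  by_cases hn2 : n < 2
  · -- n < 2: both sides are 0
    rw [if_neg (show ¬(2 ≤ n ∧ _) by rintro ⟨h2, -⟩; omega)]
    by_cases hlen : (devsL n).length < 3
    · rw [if_pos hlen]
    · rw [if_neg hlen, if_neg]
      rintro ⟨h3, -, hpz⟩
      obtain ⟨a, b, c, habc⟩ := List.length_eq_three.mp h3
      have hmem : ∀ x ∈ devsL n, 2 ≤ x := by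
        intro x hx
        obtain ⟨⟨h1, -, hp⟩, -⟩ := (mem_devs n x).mp hx
        have := hp.two_le
        omega
      have ha := hmem a (by simp [habc])
      have hb := hmem b (by simp [habc])
      have hc := hmem c (by simp [habc])
      rw [proz_eq, habc] at hpz
      simp only [List.prod_cons, List.prod_nil, mul_one] at hpz
      have h1 : 4 ≤ b * c := by nlinarith
      have h2 : 8 ≤ a * (b * c) := by nlinarith
      omega
  · have hn0 : n = ((n.toNat : Nat) : Int) := by omega
    by_cases hC : Squarefree n.toNat ∧ n.toNat.primeFactors.card = 3 ∧ sig n.toNat < 1000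
    · obtain ⟨hsq, hcard, hsig⟩ := hC
      have hb : ∀ p ∈ n.toNat.primeFactors, p < 1500 := by
        intro p hp
        have h1 : p ≤ sig n.toNat :=
          Finset.single_le_sum (f := fun p => p) (fun i _ => Nat.zero_le i) hp
        omega
      have hF : n.toNat.primeFactors.filter (· < 1500) = n.toNat.primeFactors :=
        Finset.filter_true_of_mem hb
      have hlen3 : (devsL n).length = 3 := by rw [devs_length n (by omega), hF, hcard]
      rw [if_neg (by omega), if_pos, if_pos ⟨by omega, hsq, hcard, hsig⟩,
        devs_sum n (by omega), hF]
      · rfl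
      · refine ⟨hlen3, ?_, ?_⟩
        · rw [devs_sum n (by omega), hF]
          exact_mod_cast hsig
        · rw [devs_prod n (by omega), hF]
          rw [Nat.prod_primeFactors_of_squarefree hsq]
          omega
    · rw [if_neg (show ¬(2 ≤ n ∧ _) by rintro ⟨-, hc⟩; exact hC hc)]
      by_cases hlen : (devsL n).length < 3
      · rw [if_pos hlen]
      · rw [if_neg hlen, if_neg]
        rintro ⟨h3, hs, hpz⟩
        apply hC
        rw [devs_length n (by omega)] at h3
        rw [devs_sum n (by omega)] at hs
        rw [devs_prod n (by omega)] at hpz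
        have hsN : (∑ p ∈ n.toNat.primeFactors.filter (· < 1500), p) < 1000 := by
          exact_mod_cast hs
        have hpN : (∏ p ∈ n.toNat.primeFactors.filter (· < 1500), p) = n.toNat := by
          omega
        obtain ⟨p, q, r, hpq, hpr, hqr, hFpqr⟩ := Finset.card_eq_three.mp h3
        have hmemF : ∀ y ∈ n.toNat.primeFactors.filter (· < 1500), Nat.Prime y := by
          intro y hy
          exact (Nat.mem_primeFactors.mp (Finset.mem_filter.mp hy).1).1
        have mp : Nat.Prime p := hmemF p (by simp [hFpqr])
        have mq : Nat.Prime q := hmemF q (by simp [hFpqr])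
        have mr : Nat.Prime r := hmemF r (by simp [hFpqr])
        have hprodN : p * (q * r) = n.toNat := by
          rw [hFpqr] at hpN
          rw [Finset.prod_insert (by simp [hpq, hpr]),
            Finset.prod_insert (by simp [hqr]), Finset.prod_singleton] at hpN
          exact hpN
        have hcqr : Nat.Coprime q r := (Nat.coprime_primes mq mr).mpr hqr
        have hcp : Nat.Coprime p (q * r) :=
          Nat.Coprime.mul_right ((Nat.coprime_primes mp mq).mpr hpq)
            ((Nat.coprime_primes mp mr).mpr hpr)
        have hsq : Squarefree n.toNat := by
          rw [← hprodN]
          exact (Nat.squarefree_mul hcp).mpr ⟨mp.squarefree,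
            (Nat.squarefree_mul hcqr).mpr ⟨mq.squarefree, mr.squarefree⟩⟩
        have hPF : n.toNat.primeFactors = insert p (insert q {r}) := by
          rw [← hprodN, Nat.primeFactors_mul mp.pos.ne' (Nat.mul_ne_zero mq.pos.ne' mr.pos.ne'),
            Nat.primeFactors_mul mq.pos.ne' mr.pos.ne',
            mp.primeFactors, mq.primeFactors, mr.primeFactors]
          simp only [Finset.singleton_union]
        refine ⟨hsq, ?_, ?_⟩
        · rw [hPF, ← hFpqr, h3]
        · unfold sig
          rw [hPF, ← hFpqr]
          omega

-- ===== VERDICT (by name: the statement is the Claim_ definition above) =====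
theorem f_spec : Claim_equal_f := by
  intro n _
  unfold Spec_f
  rw [f_eq, f_alt_eq]
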